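-- pv_equiv track=rewrite | github.com/kel89/2023-Advent-Of-Code | puzzle_1_2/main.py | get_last_number
-- ===== SOURCE A (Python) =====
-- numbers = [
--     # "zero",
--     "one",
--     "two",
--     "three",
--     "four",
--     "five",
--     "six",
--     "seven",
--     "eight",
--     "nine",
-- ]
--
-- def get_last_number(line):
--     for i in range(len(line)-1, -1, -1):
--         if line[i].isdigit():
--             return line[i]
--         for num in numbers:
--             target_len =len(num)
--             if line[i: i + target_len] == num:
--                 return num
-- ===== SOURCE B (Python) =====
-- numbers = [
--     # "zero",
--     "one",
--     "two",
--     "three",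
--     "four",
--     "five",
--     "six",
--     "seven",
--     "eight",
--     "nine",
-- ]
--
-- def get_last_number(line):
--     # Per-candidate rightmost search: rfind each word, then sweep for digits,
--     # keep the candidate with the largest start index.
--     best_i, best = -1, None
--     for num in numbers:
--         j = line.rfind(num)
--         if j > best_i:
--             best_i, best = j, num
--     for j, ch in enumerate(line):
--         if ch.isdigit() and j > best_i:
--             best_i, best = j, ch
--     return best
-- ===== Notes on version B (the rewrite author's own statement) =====
-- stated objective: alternative
-- what changed: A scans positions right-to-left and at each position tests a digit and all nine words with an early return; B instead runs one rfind per word plus one forward digit sweep and returns the candidate with the largest start index.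
import Mathlib
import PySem

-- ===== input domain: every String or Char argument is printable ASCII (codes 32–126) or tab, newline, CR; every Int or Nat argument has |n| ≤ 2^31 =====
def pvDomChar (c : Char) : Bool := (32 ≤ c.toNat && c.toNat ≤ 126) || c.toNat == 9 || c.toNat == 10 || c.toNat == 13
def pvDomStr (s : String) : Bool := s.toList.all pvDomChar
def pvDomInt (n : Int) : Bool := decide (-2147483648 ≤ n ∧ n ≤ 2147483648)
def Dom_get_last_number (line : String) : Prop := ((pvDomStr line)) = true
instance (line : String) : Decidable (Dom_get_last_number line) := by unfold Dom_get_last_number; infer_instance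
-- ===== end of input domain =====

-- B replaces A's backward positional scan (early return at the first index that carries a
-- digit or a spelled-out number) by a per-candidate rightmost search: rfind each word,
-- sweep once for the last digit, keep the candidate with the largest start index (objective: alternative).

-- module-level constant shared by both Pythons
def numbers : List String :=
  ["one", "two", "three", "four", "five", "six", "seven", "eight", "nine"]

-- ===== PORT A =====
-- for i in range(len(line)-1, -1, -1): early-return loop
def goA (s : List Char) : List Int → Option String
  | [] => none
  | i :: rest =>
    match PySem.List.pyGet? s i with
    | none => none   -- IndexError; unreachable: i is always in range here
    | some c =>
      if PySem.Chars.isdigit c then some (String.ofList [c])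
      else
        match numbers.find? (fun num =>
            PySem.List.slice s (some i) (some (i + PySem.Str.len num)) == num.toList) with
        | some num => some num
        | none => goA s rest

def get_last_number (line : String) : Option String :=
  goA line.toList (PySem.List.pyRange (PySem.Str.len line - 1) (-1) (-1))

-- ===== PORT B =====
def get_last_number_alt (line : String) : Option String :=
  let acc1 : Int × Option String := numbers.foldl
    (fun acc num =>
      let j := PySem.Str.rfind line num
      if j > acc.1 then (j, some num) else acc)
    (-1, none)
  let acc2 : Int × Option String := (PySem.List.enumerate line.toList 0).foldl
    (fun acc p =>
      if PySem.Chars.isdigit p.2 && p.1 > acc.1 then (p.1, some (String.ofList [p.2])) else acc)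
    acc1
  acc2.2

-- ===== PRECONDITION & SPEC =====
def Spec_get_last_number (line : String) (out : Option String) : Prop := out = get_last_number_alt line
instance (line : String) (out : Option String) : Decidable (Spec_get_last_number line out) := by unfold Spec_get_last_number; infer_instance

-- ===== CLAIM (what is proved, stated in full; the proofs are below) =====
def Claim_equal_get_last_number : Prop := ∀ (line : String), Dom_get_last_number line → Spec_get_last_number line (get_last_number line)

-- ===== LEMMAS AND PROOFS =====

-- per-index candidate: what A's body yields at index j (none = keep scanning)
def cand (s : List Char) (j : Nat) : Option String :=
  match s[j]? with
  | none => none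
  | some c =>
    if PySem.Chars.isdigit c then some (String.ofList [c])
    else numbers.find? (fun num => num.toList.isPrefixOf (s.drop j))

-- A's backward early-return scan over indices m-1, …, 0
def scanA (s : List Char) : Nat → Option String
  | 0 => none
  | j + 1 =>
    match cand s j with
    | some v => some v
    | none => scanA s j

-- facts about the word list -------------------------------------------------

lemma numbers_head_not_digit :
    ∀ w ∈ numbers, PySem.Chars.isdigit (w.toList.headD 'x') = false := by decide

set_option maxRecDepth 10000 in
lemma numbers_not_prefix :
    ∀ w₁ ∈ numbers, ∀ w₂ ∈ numbers, w₁.toList.isPrefixOf w₂.toList = true → w₁ = w₂ := by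
  decide

lemma numbers_ne_nil : ∀ w ∈ numbers, w.toList ≠ [] := by decide

-- generic list facts --------------------------------------------------------

lemma take_beq_eq_isPrefixOf (l p : List Char) :
    ((l.take p.length) == p) = p.isPrefixOf l := by
  rw [Bool.eq_iff_iff, beq_iff_eq, List.isPrefixOf_iff_prefix, List.prefix_iff_eq_take]
  exact eq_comm

lemma find?_eq_some_of_unique {α : Type} {p : α → Bool} {l : List α} {a : α}
    (ha : a ∈ l) (hpa : p a = true) (huniq : ∀ b ∈ l, p b = true → b = a) :
    l.find? p = some a := by
  induction l with
  | nil => cases ha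
  | cons b tl ih =>
    by_cases hb : p b = true
    · have hba : b = a := huniq b (List.mem_cons_self ..) hb
      subst hba
      simp [List.find?, hpa]
    · have hba : b ≠ a := fun h => hb (h ▸ hpa)
      have ha' : a ∈ tl := by
        rcases List.mem_cons.mp ha with h | h
        · exact absurd h.symm hba
        · exact h
      simp only [List.find?, hb]
      exact ih ha' (fun c hc hpc => huniq c (List.mem_cons_of_mem _ hc) hpc)

-- word matches --------------------------------------------------------------

lemma wmatch_lt_length {s : List Char} {j : Nat} {w : String} (hw : w ∈ numbers)
    (h : w.toList.isPrefixOf (s.drop j) = true) : j < s.length := by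
  have hne := numbers_ne_nil w hw
  by_contra hj
  rw [List.drop_eq_nil_of_le (by omega)] at h
  rw [List.isPrefixOf_iff_prefix, List.prefix_nil] at h
  exact hne h

lemma wmatch_head {s : List Char} {j : Nat} {w : String} (hw : w ∈ numbers)
    (h : w.toList.isPrefixOf (s.drop j) = true) :
    ∃ c, s[j]? = some c ∧ PySem.Chars.isdigit c = false := by
  have hhead := numbers_head_not_digit w hw
  have hne := numbers_ne_nil w hw
  rw [List.isPrefixOf_iff_prefix] at h
  cases hwl : w.toList with
  | nil => exact absurd hwl hne
  | cons c t =>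
    rw [hwl] at hhead h
    simp only [List.headD_cons] at hhead
    refine ⟨c, ?_, hhead⟩
    rcases h with ⟨r, hr⟩
    have h0 : (s.drop j)[0]? = some c := by rw [← hr]; rfl
    rw [List.getElem?_drop] at h0
    simpa using h0

lemma wmatch_unique {s : List Char} {j : Nat} {w₁ w₂ : String}
    (h₁ : w₁ ∈ numbers) (h₂ : w₂ ∈ numbers)
    (hp₁ : w₁.toList.isPrefixOf (s.drop j) = true)
    (hp₂ : w₂.toList.isPrefixOf (s.drop j) = true) : w₁ = w₂ := by
  rw [List.isPrefixOf_iff_prefix] at hp₁ hp₂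
  rcases List.prefix_or_prefix_of_prefix hp₁ hp₂ with h | h
  · exact numbers_not_prefix w₁ h₁ w₂ h₂ (List.isPrefixOf_iff_prefix.mpr h)
  · exact (numbers_not_prefix w₂ h₂ w₁ h₁ (List.isPrefixOf_iff_prefix.mpr h)).symm

-- cand characterisation ------------------------------------------------------

lemma cand_eq_none_iff {s : List Char} {j : Nat} (hj : j < s.length) :
    cand s j = none ↔
      (PySem.Chars.isdigit s[j] = false ∧ ∀ w ∈ numbers, w.toList.isPrefixOf (s.drop j) = false) := by
  unfold cand
  rw [List.getElem?_eq_getElem hj]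
  cases hd : PySem.Chars.isdigit s[j] with
  | true => simp [hd]
  | false =>
    simp only [hd, Bool.false_eq_true, if_false, List.find?_eq_none, true_and]
    constructor
    · intro h
      exact fun w hw => eq_false_of_ne_true (by simpa using h w hw)
    · intro h w hw
      simp [h w hw]

lemma cand_digit {s : List Char} {j : Nat} (hj : j < s.length)
    (hd : PySem.Chars.isdigit s[j] = true) : cand s j = some (String.ofList [s[j]]) := by
  unfold cand
  rw [List.getElem?_eq_getElem hj]
  simp [hd]

lemma cand_word {s : List Char} {j : Nat} {w : String} (hw : w ∈ numbers)
    (hp : w.toList.isPrefixOf (s.drop j) = true) : cand s j = some w := by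
  obtain ⟨c, hc, hcd⟩ := wmatch_head hw hp
  unfold cand
  rw [hc]
  simp only [hcd, Bool.false_eq_true, if_false]
  exact find?_eq_some_of_unique hw hp (fun w' hw' hp' => wmatch_unique hw' hw hp' hp)

-- scanA characterisation -----------------------------------------------------

lemma scanA_eq_none_iff (s : List Char) (m : Nat) :
    scanA s m = none ↔ ∀ j, j < m → cand s j = none := by
  induction m with
  | zero => simp [scanA]
  | succ m ih =>
    unfold scanA
    cases hc : cand s m with
    | some v =>
      simp only [reduceCtorEq, false_iff]
      intro h
      rw [h m (by omega)] at hc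
      cases hc
    | none =>
      rw [ih]
      constructor
      · intro h j hj
        rcases Nat.lt_succ_iff_lt_or_eq.mp hj with h' | h'
        · exact h j h'
        · rw [h']; exact hc
      · intro h j hj; exact h j (by omega)

lemma scanA_eq_some {s : List Char} {m j : Nat} {v : String} (hj : j < m)
    (hc : cand s j = some v) (hrest : ∀ k, j < k → k < m → cand s k = none) :
    scanA s m = some v := by
  induction m with
  | zero => omega
  | succ m ih =>
    unfold scanA
    by_cases hjm : j = m
    · rw [hjm] at hc; rw [hc]
    · rw [hrest m (by omega) (by omega)]
      exact ih (by omega) (fun k hk hk' => hrest k hk (by omega))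

-- A equals the scan ----------------------------------------------------------

lemma goA_eq_scanA (s : List Char) (j : Nat) (hj : j ≤ s.length) :
    goA s (PySem.List.pyRange ((j : Int) - 1) (-1) (-1)) = scanA s j := by
  induction j with
  | zero =>
    rw [PySem.List.pyRange_neg_one_eq_nil (by omega)]
    rfl
  | succ j ih =>
    have hjs : j < s.length := by omega
    rw [show (((j + 1 : Nat)) : Int) - 1 = (j : Int) by push_cast; ring,
        PySem.List.pyRange_neg_one_cons (by omega)]
    have hget : PySem.List.pyGet? s (j : Int) = some (s[j]'hjs) := by
      simp [PySem.List.pyGet?_natCast, List.getElem?_eq_getElem hjs]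
    have hpred : (fun num => PySem.List.slice s (some (j : Int)) (some ((j : Int) + PySem.Str.len num)) == num.toList)
        = (fun num => num.toList.isPrefixOf (s.drop j)) := by
      funext num
      rw [show ((j : Int) + PySem.Str.len num) = ((j : Int) + ((num.toList.length : Nat) : Int)) from by
            simp [PySem.Str.len_eq],
          PySem.List.slice_natCast_add]
      exact take_beq_eq_isPrefixOf _ _
    have hcand : cand s j = if PySem.Chars.isdigit (s[j]'hjs) = true then some (String.ofList [s[j]'hjs])
        else numbers.find? (fun num => num.toList.isPrefixOf (s.drop j)) := by
      unfold cand
      rw [List.getElem?_eq_getElem hjs]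
    simp only [goA, hget, hpred]
    unfold scanA
    rw [hcand]
    by_cases hd : PySem.Chars.isdigit (s[j]'hjs) = true
    · rw [if_pos hd, if_pos hd]
    · rw [if_neg hd, if_neg hd]
      cases hfv : numbers.find? (fun num => num.toList.isPrefixOf (s.drop j)) with
      | some v => rfl
      | none => exact ih (by omega)

lemma A_eq_scanA (line : String) :
    get_last_number line = scanA line.toList line.toList.length := by
  unfold get_last_number
  rw [show PySem.Str.len line = (line.toList.length : Int) from by simp [PySem.Str.len_eq]]
  exact goA_eq_scanA line.toList line.toList.length (le_refl _)

-- rfind characterisation -----------------------------------------------------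

lemma rfind_go_spec (s sub : List Char) (m : Nat) :
    (PySem.Chars.rfind.go s sub m = -1 ∧ ∀ j, j ≤ m → sub.isPrefixOf (s.drop j) = false)
    ∨ (∃ j, j ≤ m ∧ PySem.Chars.rfind.go s sub m = (j : Int) ∧
        sub.isPrefixOf (s.drop j) = true ∧
        ∀ k, j < k → k ≤ m → sub.isPrefixOf (s.drop k) = false) := by
  induction m with
  | zero =>
    by_cases h : sub.isPrefixOf s = true
    · right
      exact ⟨0, le_refl _, by simp [PySem.Chars.rfind.go, h], by simpa using h, by omega⟩
    · left
      refine ⟨by simp [PySem.Chars.rfind.go, h], ?_⟩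
      intro j hj
      rw [Nat.le_zero.mp hj]
      simpa using eq_false_of_ne_true h
  | succ m ih =>
    by_cases h : sub.isPrefixOf (s.drop (m + 1)) = true
    · right
      exact ⟨m + 1, le_refl _, by simp [PySem.Chars.rfind.go, h], h, by omega⟩
    · have hgo : PySem.Chars.rfind.go s sub (m + 1) = PySem.Chars.rfind.go s sub m := by
        simp [PySem.Chars.rfind.go, h]
      rcases ih with ⟨h1, h2⟩ | ⟨j, hj, hval, hpre, hrest⟩
      · left
        refine ⟨by rw [hgo]; exact h1, ?_⟩
        intro j hj
        rcases Nat.le_succ_iff.mp hj with h' | h'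
        · exact h2 j h'
        · rw [h']; exact eq_false_of_ne_true h
      · right
        refine ⟨j, by omega, by rw [hgo]; exact hval, hpre, ?_⟩
        intro k hk hk'
        rcases Nat.le_succ_iff.mp hk' with h' | h'
        · exact hrest k hk h'
        · rw [h']; exact eq_false_of_ne_true h

lemma rfind_neg_one_iff (s sub : List Char) (hsub : sub ≠ []) :
    PySem.Chars.rfind s sub = -1 ↔ ∀ j : Nat, sub.isPrefixOf (s.drop j) = false := by
  have hbig : ∀ j : Nat, s.length < j → sub.isPrefixOf (s.drop j) = false := by
    intro j hj
    rw [List.drop_eq_nil_of_le (by omega)]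
    cases sub with
    | nil => exact absurd rfl hsub
    | cons c t => rfl
  unfold PySem.Chars.rfind
  rcases rfind_go_spec s sub s.length with ⟨h1, h2⟩ | ⟨j, hj, hval, hpre, _⟩
  · constructor
    · intro _ j
      by_cases hjs : j ≤ s.length
      · exact h2 j hjs
      · exact hbig j (by omega)
    · intro _; exact h1
  · rw [hval]
    constructor
    · intro h; omega
    · intro h; rw [h j] at hpre; cases hpre

lemma rfind_nonneg_spec (s sub : List Char) {J : Int} (hJ : 0 ≤ J)
    (hval : PySem.Chars.rfind s sub = J) (hsub : sub ≠ []) :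
    ∃ j : Nat, J = (j : Int) ∧ sub.isPrefixOf (s.drop j) = true ∧
      ∀ k : Nat, j < k → sub.isPrefixOf (s.drop k) = false := by
  have hbig : ∀ k : Nat, s.length < k → sub.isPrefixOf (s.drop k) = false := by
    intro k hk
    rw [List.drop_eq_nil_of_le (by omega)]
    cases sub with
    | nil => exact absurd rfl hsub
    | cons c t => rfl
  unfold PySem.Chars.rfind at hval
  rcases rfind_go_spec s sub s.length with ⟨h1, _⟩ | ⟨j, hj, hgo, hpre, hrest⟩
  · rw [h1] at hval; omega
  · rw [hgo] at hval
    refine ⟨j, hval.symm, hpre, ?_⟩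
    intro k hk
    by_cases hks : k ≤ s.length
    · exact hrest k hk hks
    · exact hbig k (by omega)

-- the two folds of B ---------------------------------------------------------

lemma fold1_spec (s : List Char) :
    ∀ (ws : List String) (acc : Int × Option String),
    (ws.foldl (fun acc num =>
        if PySem.Chars.rfind s num.toList > acc.1 then (PySem.Chars.rfind s num.toList, some num) else acc)
      acc = acc ∧ ∀ w ∈ ws, PySem.Chars.rfind s w.toList ≤ acc.1)
    ∨ (∃ w ∈ ws,
        ws.foldl (fun acc num =>
          if PySem.Chars.rfind s num.toList > acc.1 then (PySem.Chars.rfind s num.toList, some num) else acc)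
        acc = (PySem.Chars.rfind s w.toList, some w) ∧
        acc.1 < PySem.Chars.rfind s w.toList ∧
        ∀ w' ∈ ws, PySem.Chars.rfind s w'.toList ≤ PySem.Chars.rfind s w.toList) := by
  intro ws
  induction ws with
  | nil => intro acc; left; simp
  | cons w tl ih =>
    intro acc
    by_cases hw : PySem.Chars.rfind s w.toList > acc.1
    · simp only [List.foldl_cons, hw, if_true]
      rcases ih (PySem.Chars.rfind s w.toList, some w) with ⟨h1, h2⟩ | ⟨w', hw', h1, h2, h3⟩
      · right
        refine ⟨w, List.mem_cons_self .., h1, hw, ?_⟩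
        intro w' hw'
        rcases List.mem_cons.mp hw' with h | h
        · rw [h]
        · exact h2 w' h
      · right
        refine ⟨w', List.mem_cons_of_mem _ hw', h1, by omega, ?_⟩
        intro w'' hw''
        rcases List.mem_cons.mp hw'' with h | h
        · rw [h]; omega
        · exact h3 w'' h
    · simp only [List.foldl_cons, hw, if_false]
      rcases ih acc with ⟨h1, h2⟩ | ⟨w', hw', h1, h2, h3⟩
      · left
        refine ⟨h1, ?_⟩
        intro w' hw'
        rcases List.mem_cons.mp hw' with h | h
        · rw [h]; omega
        · exact h2 w' h
      · right
        refine ⟨w', List.mem_cons_of_mem _ hw', h1, h2, ?_⟩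
        intro w'' hw''
        rcases List.mem_cons.mp hw'' with h | h
        · rw [h]; omega
        · exact h3 w'' h

lemma fold2_spec :
    ∀ (l : List Char) (k : Int) (acc : Int × Option String),
    ((PySem.List.enumerate l k).foldl (fun acc p =>
        if PySem.Chars.isdigit p.2 && p.1 > acc.1 then (p.1, some (String.ofList [p.2])) else acc)
      acc = acc ∧ ∀ p : Nat, (hp : p < l.length) → PySem.Chars.isdigit l[p] = true → ¬ acc.1 < k + p)
    ∨ (∃ p : Nat, ∃ hp : p < l.length, PySem.Chars.isdigit l[p] = true ∧ acc.1 < k + p ∧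
        (PySem.List.enumerate l k).foldl (fun acc p =>
          if PySem.Chars.isdigit p.2 && p.1 > acc.1 then (p.1, some (String.ofList [p.2])) else acc)
        acc = (k + p, some (String.ofList [l[p]])) ∧
        ∀ q : Nat, (hq : q < l.length) → p < q → PySem.Chars.isdigit l[q] = false) := by
  intro l
  induction l with
  | nil => intro k acc; left; simp [PySem.List.enumerate_nil]
  | cons c tl ih =>
    intro k acc
    rw [PySem.List.enumerate_cons, List.foldl_cons]
    cases hcb : (PySem.Chars.isdigit c && decide (k > acc.1)) with
    | true =>
      simp only [gt_iff_lt] at hcb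
      simp only [if_true]
      obtain ⟨hcd, hck'⟩ := Bool.and_eq_true_iff.mp hcb
      have hck : acc.1 < k := of_decide_eq_true hck'
      rcases ih (k + 1) (k, some (String.ofList [c])) with ⟨h1, h2⟩ | ⟨p, hp, h1, h2, h3, h4⟩
      · right
        refine ⟨0, by simp, by simpa using hcd, by simpa using hck, by simpa using h1, ?_⟩
        intro q hq hq0
        cases q with
        | zero => omega
        | succ q =>
          have hq' : q < tl.length := by simpa using hq
          by_contra hdig
          have hdig' : PySem.Chars.isdigit tl[q] = true := by
            have := eq_true_of_ne_false hdig
            simpa using this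
          exact h2 q hq' hdig' (by push_cast; omega)
      · right
        have hp' : p + 1 < (c :: tl).length := by simpa using Nat.succ_lt_succ hp
        refine ⟨p + 1, hp', by simpa using h1, ?_, ?_, ?_⟩
        · push_cast
          push_cast at h2
          omega
        · have hcast : k + ((p + 1 : Nat) : Int) = (k + 1) + (p : Int) := by push_cast; ring
          rw [hcast]
          have helem : (c :: tl)[p + 1]'hp' = tl[p]'hp := by simp
          rw [helem]
          exact h3
        · intro q hq hq'
          cases q with
          | zero => omega
          | succ q =>
            have := h4 q (by simpa using hq) (by omega)
            simpa using this
    | false =>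
      simp only [gt_iff_lt] at hcb
      simp only [Bool.false_eq_true, if_false]
      rcases ih (k + 1) acc with ⟨h1, h2⟩ | ⟨p, hp, h1, h2, h3, h4⟩
      · left
        refine ⟨h1, ?_⟩
        intro p hp hpd
        cases p with
        | zero =>
          intro hlt
          have : (PySem.Chars.isdigit c && decide (k > acc.1)) = true := by
            simp only [Bool.and_eq_true_iff, gt_iff_lt, decide_eq_true_eq]
            refine ⟨by simpa using hpd, by push_cast at hlt; omega⟩
          rw [this] at hcb
          cases hcb
        | succ p =>
          intro hlt
          exact h2 p (by simpa using hp) (by simpa using hpd) (by push_cast at hlt ⊢; omega)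
      · right
        have hp' : p + 1 < (c :: tl).length := by simpa using Nat.succ_lt_succ hp
        refine ⟨p + 1, hp', by simpa using h1, ?_, ?_, ?_⟩
        · push_cast
          omega
        · have hcast : k + ((p + 1 : Nat) : Int) = (k + 1) + (p : Int) := by push_cast; ring
          rw [hcast]
          have helem : (c :: tl)[p + 1]'hp' = tl[p]'hp := by simp
          rw [helem]
          exact h3
        · intro q hq hq'
          cases q with
          | zero => omega
          | succ q =>
            have := h4 q (by simpa using hq) (by omega)
            simpa using this

lemma neg_one_le_rfind (s sub : List Char) : -1 ≤ PySem.Chars.rfind s sub := by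
  unfold PySem.Chars.rfind
  rcases rfind_go_spec s sub s.length with ⟨h1, _⟩ | ⟨j, _, hval, _, _⟩
  · rw [h1]
  · rw [hval]; omega

lemma le_rfind_of_match (s sub : List Char) (hsub : sub ≠ []) (k : Nat)
    (h : sub.isPrefixOf (s.drop k) = true) : (k : Int) ≤ PySem.Chars.rfind s sub := by
  by_contra hlt
  rw [not_le] at hlt
  by_cases hneg : PySem.Chars.rfind s sub = -1
  · rw [(rfind_neg_one_iff s sub hsub).mp hneg k] at h
    cases h
  · obtain ⟨j, hJ, _, habove⟩ := rfind_nonneg_spec s sub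
      (by have := neg_one_le_rfind s sub; omega) rfl hsub
    rw [habove k (by omega)] at h
    cases h

-- final assembly -------------------------------------------------------------

theorem main_equiv (line : String) : get_last_number line = get_last_number_alt line := by
  unfold get_last_number_alt
  rw [A_eq_scanA]
  simp only [PySem.Str.rfind_eq]
  rcases fold1_spec line.toList numbers (-1, none) with ⟨h1, h2⟩ | ⟨w, hw, h1, h2, h3⟩
  · -- no word matches anywhere
    have hnoword : ∀ w ∈ numbers, ∀ j : Nat, w.toList.isPrefixOf (line.toList.drop j) = false := by
      intro w hw j
      have hle := h2 w hw
      have hge := neg_one_le_rfind line.toList w.toList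
      exact (rfind_neg_one_iff line.toList w.toList (numbers_ne_nil w hw)).mp (by simpa using le_antisymm hle hge) j
    rw [h1]
    rcases fold2_spec line.toList 0 (-1, none) with ⟨g1, g2⟩ | ⟨p, hp, g1, g2, g3, g4⟩
    · -- no digit either: both none
      rw [g1]
      dsimp only
      rw [scanA_eq_none_iff]
      intro j hj
      rw [cand_eq_none_iff hj]
      refine ⟨?_, fun w hw => hnoword w hw j⟩
      by_contra hd
      exact g2 j hj (eq_true_of_ne_false hd) (by push_cast; omega)
    · -- last digit wins
      rw [g3]
      dsimp only
      refine scanA_eq_some hp (cand_digit hp g1) ?_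
      intro k hk hk'
      rw [cand_eq_none_iff hk']
      exact ⟨g4 k hk' hk, fun w hw => hnoword w hw k⟩
  · -- a word match exists; its rightmost index is acc1.1
    have hwne := numbers_ne_nil w hw
    have hJ0 : 0 ≤ PySem.Chars.rfind line.toList w.toList := by omega
    obtain ⟨jw, hjw, hpre, habove⟩ := rfind_nonneg_spec line.toList w.toList hJ0 rfl hwne
    have hjwlt : jw < line.toList.length := wmatch_lt_length hw hpre
    have hnoword : ∀ w' ∈ numbers, ∀ k : Nat, jw < k →
        w'.toList.isPrefixOf (line.toList.drop k) = false := by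
      intro w' hw' k hk
      by_contra hmatch
      have := le_rfind_of_match line.toList w'.toList (numbers_ne_nil w' hw') k
        (eq_true_of_ne_false hmatch)
      have := h3 w' hw'
      omega
    rw [h1]
    rcases fold2_spec line.toList 0 (PySem.Chars.rfind line.toList w.toList, some w)
        with ⟨g1, g2⟩ | ⟨p, hp, g1, g2, g3, g4⟩
    · -- no digit beyond jw: the word wins
      rw [g1]
      dsimp only
      refine scanA_eq_some hjwlt (cand_word hw hpre) ?_
      intro k hk hk'
      rw [cand_eq_none_iff hk']
      refine ⟨?_, fun w' hw' => hnoword w' hw' k hk⟩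
      by_contra hd
      exact g2 k hk' (eq_true_of_ne_false hd) (by push_cast; omega)
    · -- a digit beyond jw: the last digit wins
      rw [g3]
      dsimp only
      have hjp : jw < p := by rw [hjw] at g2; push_cast at g2; omega
      refine scanA_eq_some hp (cand_digit hp g1) ?_
      intro k hk hk'
      rw [cand_eq_none_iff hk']
      exact ⟨g4 k hk' hk, fun w' hw' => hnoword w' hw' k (by omega)⟩

-- ===== VERDICT (by name: the statement is the Claim_ definition above) =====
theorem get_last_number_spec : Claim_equal_get_last_number := by
  intro line _
  exact main_equiv line
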